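-- pv_equiv track=rewrite | github.com/pappyhammer/bonn_assemblies | main_bonn.py | count_channels_among_microwires
-- ===== SOURCE A (Python) =====
-- def count_channels_among_microwires(microwires_list, hippocampus_as_one):
--     """
--
--     Args:
--         microwires_list: list of string. Ex: ["MU 51 RA8", "SU 51 RA8"]
--         hippocampus_as_one: if True, all parts of hippocampus are considered as one
--
--     Returns:
--
--     """
--     # n_microw = len(microwires_list)
--     counter_dict = dict()
--
--     for microwire in microwires_list:
--         unique_channels = ["EC", "AH", "MH", "PHC"]
--         for channel in unique_channels:
--             if channel in microwire:
--                 counter_dict[channel] = counter_dict.get(channel, 0) + 1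
--         if ("A" in microwire) and ("AH" not in microwire):
--             counter_dict["A"] = counter_dict.get("A", 0) + 1
--         if ("PH" in microwire) and ("PHC" not in microwire):
--             counter_dict["PH"] = counter_dict.get("PH", 0) + 1
--
--     if hippocampus_as_one:
--         counter_dict["H"] = 0
--         hipp_parts = ["AH", "MH", "PH"]
--         for hipp_part in hipp_parts:
--             if hipp_part in counter_dict:
--                 counter_dict["H"] = counter_dict["H"] + counter_dict[hipp_part]
--                 del counter_dict[hipp_part]
--         if counter_dict["H"] == 0:
--             del counter_dict["H"]
--     return counter_dict
-- ===== SOURCE B (Python) =====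
-- def count_channels_among_microwires(microwires_list, hippocampus_as_one):
--     def hits(label, m):
--         if label == "A":
--             return "A" in m and "AH" not in m
--         if label == "PH":
--             return "PH" in m and "PHC" not in m
--         return label in m
--
--     order = ["EC", "AH", "MH", "PHC", "A", "PH"]
--     # stage 1: one pass over the wires only to discover key order (first occurrence)
--     keys = []
--     for m in microwires_list:
--         for label in order:
--             if hits(label, m) and label not in keys:
--                 keys.append(label)
--     # stage 2: an independent counting scan per discovered key
--     result = {k: sum(1 for m in microwires_list if hits(k, m)) for k in keys}
--
--     if hippocampus_as_one:
--         h = sum(result.pop(part, 0) for part in ("AH", "MH", "PH"))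
--         if h > 0:
--             result["H"] = h
--     return result
-- ===== Notes on version B (the rewrite author's own statement) =====
-- stated objective: alternative
-- what changed: A threads one counter dict through a single interleaved per-wire pass; B never maintains a counter at all: a first pass only discovers the key order (first occurrence), then each key's count is computed by an independent per-label scan over the wires (the inverted loop), and the hippocampus merge pops the three parts and appends their sum.
import Mathlib
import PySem

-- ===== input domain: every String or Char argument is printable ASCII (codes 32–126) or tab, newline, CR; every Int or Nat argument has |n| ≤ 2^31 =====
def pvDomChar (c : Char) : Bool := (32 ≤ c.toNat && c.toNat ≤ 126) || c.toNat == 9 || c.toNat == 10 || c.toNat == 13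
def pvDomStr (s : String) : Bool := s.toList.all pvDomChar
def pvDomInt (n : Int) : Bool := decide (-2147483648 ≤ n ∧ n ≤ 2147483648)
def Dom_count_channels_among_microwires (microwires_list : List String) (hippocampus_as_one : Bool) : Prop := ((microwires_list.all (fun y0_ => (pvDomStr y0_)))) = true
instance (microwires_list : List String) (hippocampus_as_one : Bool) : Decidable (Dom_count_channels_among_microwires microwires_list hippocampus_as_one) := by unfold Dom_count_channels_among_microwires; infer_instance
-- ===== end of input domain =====

-- B replaces A's single interleaved counter-dict pass by staged passes: one pass that only
-- discovers the key order (first occurrence), then an independent counting scan per key,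
-- with the hippocampus merge done by popping the three parts and appending their sum.


-- ===== PORT A =====
-- literal transliteration of A; counter_dict[k] on the guarded direct lookups is ported as
-- getD k 0 (the key is provably present there, so no KeyError can occur and the default is never used)
def count_channels_among_microwires (microwires_list : List String) (hippocampus_as_one : Bool) : List (String × Int) :=
  let counter_dict : PySem.Dict String Int :=
    microwires_list.foldl (fun counter_dict microwire =>
      let counter_dict := (["EC", "AH", "MH", "PHC"] : List String).foldl
        (fun counter_dict channel =>
          if PySem.Str.isIn channel microwire then
            counter_dict.insert channel (counter_dict.getD channel 0 + 1)
          else counter_dict) counter_dict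
      let counter_dict :=
        if PySem.Str.isIn "A" microwire && !(PySem.Str.isIn "AH" microwire) then
          counter_dict.insert "A" (counter_dict.getD "A" 0 + 1)
        else counter_dict
      if PySem.Str.isIn "PH" microwire && !(PySem.Str.isIn "PHC" microwire) then
        counter_dict.insert "PH" (counter_dict.getD "PH" 0 + 1)
      else counter_dict) PySem.Dict.empty
  if hippocampus_as_one then
    let counter_dict := counter_dict.insert "H" (0 : Int)
    let counter_dict := (["AH", "MH", "PH"] : List String).foldl
      (fun counter_dict hipp_part =>
        if counter_dict.contains hipp_part then
          (counter_dict.insert "H" (counter_dict.getD "H" 0 + counter_dict.getD hipp_part 0)).erase hipp_part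
        else counter_dict) counter_dict
    if counter_dict.getD "H" 0 == 0 then (counter_dict.erase "H").items
    else counter_dict.items
  else counter_dict.items

-- ===== PORT B =====
-- B-side helper: hits(label, m) from Source B
def pvHits (label m : String) : Bool :=
  if label == "A" then PySem.Str.isIn "A" m && !(PySem.Str.isIn "AH" m)
  else if label == "PH" then PySem.Str.isIn "PH" m && !(PySem.Str.isIn "PHC" m)
  else PySem.Str.isIn label m

def pvOrder : List String := ["EC", "AH", "MH", "PHC", "A", "PH"]

-- transliteration of Source B: the key-discovery pass, then a per-key counting fold;
-- sum(result.pop(part, 0)) is ported as the same left fold of the three popped values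
-- (keys are distinct, so each pop returns the original entry) followed by filtering
-- the three part keys out of the association list
def count_channels_among_microwires_alt (microwires_list : List String) (hippocampus_as_one : Bool) : List (String × Int) :=
  let keys : List String := microwires_list.foldl (fun keys m =>
    pvOrder.foldl (fun keys label =>
      if pvHits label m && !(keys.contains label) then keys ++ [label] else keys) keys) []
  let result := keys.map (fun k =>
    (k, microwires_list.foldl (fun acc m => if pvHits k m then acc + 1 else acc) (0 : Int)))
  if hippocampus_as_one then
    let h := (["AH", "MH", "PH"] : List String).foldl
      (fun acc part => acc + (((result.find? (fun q => q.1 == part)).map Prod.snd).getD 0)) 0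
    let result := result.filter (fun q => !(q.1 == "AH" || q.1 == "MH" || q.1 == "PH"))
    if h > 0 then result ++ [("H", h)] else result
  else result

-- ===== PRECONDITION & SPEC =====
def Spec_count_channels_among_microwires (microwires_list : List String) (hippocampus_as_one : Bool) (out : List (String × Int)) : Prop := out = count_channels_among_microwires_alt microwires_list hippocampus_as_one
instance (microwires_list : List String) (hippocampus_as_one : Bool) (out : List (String × Int)) : Decidable (Spec_count_channels_among_microwires microwires_list hippocampus_as_one out) := by unfold Spec_count_channels_among_microwires; infer_instance

-- ===== CLAIM (what is proved, stated in full; the proofs are below) =====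
def Claim_equal_count_channels_among_microwires : Prop := ∀ (microwires_list : List String) (hippocampus_as_one : Bool), Dom_count_channels_among_microwires microwires_list hippocampus_as_one → Spec_count_channels_among_microwires microwires_list hippocampus_as_one (count_channels_among_microwires microwires_list hippocampus_as_one)

-- ===== LEMMAS AND PROOFS =====

-- proof-only: the labels a single microwire contributes, in A's insertion order
def pvMatched (m : String) : List String :=
  let labels := (["EC", "AH", "MH", "PHC"] : List String).filter (fun c => PySem.Str.isIn c m)
  let labels :=
    if PySem.Str.isIn "A" m && !(PySem.Str.isIn "AH" m) then labels ++ ["A"] else labels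
  if PySem.Str.isIn "PH" m && !(PySem.Str.isIn "PHC" m) then labels ++ ["PH"] else labels

-- hits on each literal label reduces to its plain predicate
theorem pvHits_EC (m : String) : pvHits "EC" m = PySem.Str.isIn "EC" m := rfl
theorem pvHits_AH (m : String) : pvHits "AH" m = PySem.Str.isIn "AH" m := rfl
theorem pvHits_MH (m : String) : pvHits "MH" m = PySem.Str.isIn "MH" m := rfl
theorem pvHits_PHC (m : String) : pvHits "PHC" m = PySem.Str.isIn "PHC" m := rfl
theorem pvHits_A (m : String) :
    pvHits "A" m = (PySem.Str.isIn "A" m && !(PySem.Str.isIn "AH" m)) := rfl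
theorem pvHits_PH (m : String) :
    pvHits "PH" m = (PySem.Str.isIn "PH" m && !(PySem.Str.isIn "PHC" m)) := rfl

-- pvMatched m is pvOrder filtered through the hits predicate
theorem pvMatched_eq_filter (m : String) :
    pvMatched m = pvOrder.filter (fun l => pvHits l m) := by
  simp only [pvMatched, pvOrder, List.filter_cons, List.filter_nil,
    pvHits_EC, pvHits_AH, pvHits_MH, pvHits_PHC, pvHits_A, pvHits_PH]
  split_ifs <;> simp_all

-- A's per-microwire step is the bump fold over pvMatched
theorem pvStepA_eq (d : PySem.Dict String Int) (m : String) :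
    (let d1 := (["EC", "AH", "MH", "PHC"] : List String).foldl
        (fun dd channel =>
          if PySem.Str.isIn channel m then dd.insert channel (dd.getD channel 0 + 1) else dd) d
     let d2 :=
        if PySem.Str.isIn "A" m && !(PySem.Str.isIn "AH" m) then
          d1.insert "A" (d1.getD "A" 0 + 1)
        else d1
     if PySem.Str.isIn "PH" m && !(PySem.Str.isIn "PHC" m) then
        d2.insert "PH" (d2.getD "PH" 0 + 1)
     else d2) = (pvMatched m).foldl (fun d x => d.insert x (d.getD x 0 + 1)) d := by
  simp only [pvMatched]
  rw [PySem.List.foldl_if_eq_foldl_filter]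
  split_ifs with h1 h2 h2 <;> simp [List.foldl_append]

-- A's main loop produces Counter(stream)
theorem pvCore_eq (ms : List String) :
    ms.foldl (fun counter_dict microwire =>
      let counter_dict := (["EC", "AH", "MH", "PHC"] : List String).foldl
        (fun counter_dict channel =>
          if PySem.Str.isIn channel microwire then
            counter_dict.insert channel (counter_dict.getD channel 0 + 1)
          else counter_dict) counter_dict
      let counter_dict :=
        if PySem.Str.isIn "A" microwire && !(PySem.Str.isIn "AH" microwire) then
          counter_dict.insert "A" (counter_dict.getD "A" 0 + 1)
        else counter_dict
      if PySem.Str.isIn "PH" microwire && !(PySem.Str.isIn "PHC" microwire) then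
        counter_dict.insert "PH" (counter_dict.getD "PH" 0 + 1)
      else counter_dict) PySem.Dict.empty
    = PySem.Dict.counter (ms.flatMap pvMatched) := by
  have hfun : (fun (counter_dict : PySem.Dict String Int) (microwire : String) =>
      let counter_dict := (["EC", "AH", "MH", "PHC"] : List String).foldl
        (fun counter_dict channel =>
          if PySem.Str.isIn channel microwire then
            counter_dict.insert channel (counter_dict.getD channel 0 + 1)
          else counter_dict) counter_dict
      let counter_dict :=
        if PySem.Str.isIn "A" microwire && !(PySem.Str.isIn "AH" microwire) then
          counter_dict.insert "A" (counter_dict.getD "A" 0 + 1)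
        else counter_dict
      if PySem.Str.isIn "PH" microwire && !(PySem.Str.isIn "PHC" microwire) then
        counter_dict.insert "PH" (counter_dict.getD "PH" 0 + 1)
      else counter_dict)
      = (fun d m => (pvMatched m).foldl (fun d x => d.insert x (d.getD x 0 + 1)) d) := by
    funext d m; exact pvStepA_eq d m
  rw [hfun, ← List.foldl_flatMap, ← PySem.Dict.foldl_insert_getD_add_one_eq_counter]

-- B's first pass collects PySem.Set.ofList of the stream
theorem pvFoldl_if_and (p : String → Bool) (q : List String → String → Bool)
    (f : List String → String → List String) :
    ∀ (xs : List String) (acc : List String),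
    xs.foldl (fun a l => if p l && q a l then f a l else a) acc
      = (xs.filter p).foldl (fun a l => if q a l then f a l else a) acc := by
  intro xs
  induction xs with
  | nil => intro acc; rfl
  | cons x t ih =>
    intro acc
    simp only [List.foldl_cons, List.filter_cons]
    cases hp : p x with
    | true =>
      simp only [hp, Bool.true_and, if_true, List.foldl_cons]
      exact ih _
    | false =>
      simp only [hp, Bool.false_and, Bool.false_eq_true, if_false]
      exact ih _

theorem pvKeys_eq (ms : List String) :
    ms.foldl (fun keys m =>
      pvOrder.foldl (fun keys label =>
        if pvHits label m && !(keys.contains label) then keys ++ [label] else keys) keys) []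
    = PySem.Set.ofList (ms.flatMap pvMatched) := by
  have hstep : (fun (keys : List String) (m : String) =>
      pvOrder.foldl (fun keys label =>
        if pvHits label m && !(keys.contains label) then keys ++ [label] else keys) keys)
      = (fun keys m => (pvMatched m).foldl PySem.Set.add keys) := by
    funext keys m
    rw [pvFoldl_if_and (fun l => pvHits l m), ← pvMatched_eq_filter]
    have hadd : (fun (a : List String) (l : String) =>
        if !(a.contains l) then a ++ [l] else a) = PySem.Set.add := by
      funext a l
      by_cases h : a.contains l = true <;> simp [PySem.Set.add, PySem.Set.contains, h]
    rw [hadd]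
  rw [hstep, ← List.foldl_flatMap, PySem.Set.ofList_eq_foldl]

-- a wire contributes each of the six labels at most once
theorem pvMatched_count (m k : String) (hk : k ∈ pvOrder) :
    (pvMatched m).count k = if pvHits k m then 1 else 0 := by
  rw [pvMatched_eq_filter]
  have h1 : pvOrder.count k = 1 := by
    fin_cases hk <;> decide
  by_cases h : pvHits k m = true
  · rw [if_pos h]
    rw [List.count_filter (by simpa using h)]
    exact h1
  · simp only [Bool.not_eq_true] at h
    rw [if_neg (by simp [h])]
    rw [List.count_eq_zero]
    intro hmem
    exact absurd ((List.mem_filter.mp hmem).2) (by simp [h])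

-- count of a label in the stream = number of wires that hit it
theorem pvCount_eq (ms : List String) (k : String) (hk : k ∈ pvOrder) :
    ((ms.flatMap pvMatched).count k : Int)
      = ms.foldl (fun acc m => if pvHits k m then acc + 1 else acc) (0 : Int) := by
  rw [PySem.List.foldl_if_add_one]
  induction ms with
  | nil => rfl
  | cons m t ih =>
    simp only [List.flatMap_cons, List.count_append, List.countP_cons]
    rw [pvMatched_count m k hk]
    by_cases h : pvHits k m = true <;> simp [h] at ih ⊢ <;> push_cast <;> omega

-- every label in pvMatched m is one of the six channel labels (in particular never "H")
theorem pvMatched_mem (m : String) (x : String) (hx : x ∈ pvMatched m) :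
    x ∈ pvOrder := by
  unfold pvMatched at hx
  simp only [pvOrder]
  split_ifs at hx <;> simp_all <;> tauto

-- value of the first entry with key p (0 if absent)
def pvGetv (r : List (String × Int)) (p : String) : Int :=
  (((r.find? (fun q => q.1 == p)).map Prod.snd).getD 0)

theorem pvGetv_nonneg (r : List (String × Int)) (p : String)
    (hpos : ∀ q ∈ r, 0 ≤ q.2) : 0 ≤ pvGetv r p := by
  unfold pvGetv
  cases hf : r.find? (fun q => q.1 == p) with
  | none => simp
  | some q => simpa using hpos q (List.mem_of_find?_eq_some hf)

-- filtering out another key does not change the first entry found for p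
theorem pvFind_filter (r : List (String × Int)) (p p' : String) (hne : p ≠ p') :
    (r.filter (fun q => !(q.1 == p'))).find? (fun q => q.1 == p)
      = r.find? (fun q => q.1 == p) := by
  induction r with
  | nil => rfl
  | cons a t ih =>
    by_cases ha : a.1 = p'
    · have : (a.1 == p) = false := by simp [ha]; exact fun h => hne (h ▸ rfl)
      simp [List.filter_cons, ha, List.find?_cons, this, ih, beq_eq_false_iff_ne, Ne.symm hne]
    · simp [List.filter_cons, ha, List.find?_cons, ih]

-- one iteration of A's hippocampus loop on a dict of shape r ++ [("H", h0)]
theorem pvStepPart (r : List (String × Int)) (h0 : Int) (p : String) (hp : p ≠ "H")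
    (hH : ∀ q ∈ r, q.1 ≠ "H") :
    (let d : PySem.Dict String Int := PySem.Dict.mk (r ++ [("H", h0)])
     if d.contains p then
        (d.insert "H" (d.getD "H" 0 + d.getD p 0)).erase p
     else d)
    = PySem.Dict.mk ((r.filter (fun q => !(q.1 == p))) ++ [("H", h0 + pvGetv r p)]) := by
  have hHp : (("H" : String) == p) = false := by
    simp only [beq_eq_false_iff_ne]; exact fun h => hp (h ▸ rfl)
  have hfH : r.find? (fun q => q.1 == "H") = none := by
    rw [List.find?_eq_none]; intro q hq; simpa using hH q hq
  have hrH : ∀ q ∈ r, (q.1 == "H") = false := by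
    intro q hq; simpa using hH q hq
  simp only [PySem.Dict.contains, PySem.Dict.insert, PySem.Dict.erase,
    PySem.Dict.getD, PySem.Dict.get?, PySem.Dict.items, pvGetv]
  by_cases hc : r.any (fun q => q.1 == p)
  · obtain ⟨v, hv⟩ : ∃ v, r.find? (fun q => q.1 == p) = some v := by
      rcases List.any_eq_true.mp hc with ⟨x, hx, hxp⟩
      exact Option.isSome_iff_exists.mp (List.find?_isSome.mpr ⟨x, hx, hxp⟩)
    have hany : ((r ++ [("H", h0)]).any (fun q => q.1 == p)) = true := by
      simp [List.any_append, hc]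
    have hcontH : ((r ++ [("H", h0)]).any (fun q => q.1 == "H")) = true := by
      simp [List.any_append]
    have hfindH : (r ++ [("H", h0)]).find? (fun q => q.1 == "H") = some ("H", h0) := by
      rw [List.find?_append, hfH]; simp
    have hfindp : (r ++ [("H", h0)]).find? (fun q => q.1 == p) = some v := by
      rw [List.find?_append, hv]; simp
    have hmap : (r ++ [("H", h0)]).map
        (fun q => if q.1 == "H" then ("H", h0 + v.2) else q)
        = r ++ [("H", h0 + v.2)] := by
      rw [List.map_append]
      have h1 : r.map (fun q => if q.1 == "H" then ("H", h0 + v.2) else q) = r := by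
        calc r.map (fun q => if q.1 == "H" then ("H", h0 + v.2) else q)
            = r.map id := List.map_congr_left (by intro q hq; simp [hrH q hq])
          _ = r := List.map_id r
      rw [h1]
      simp
    simp only [hany, if_pos, hfindH, hfindp, hcontH, Option.map_some, Option.getD_some]
    rw [hmap, List.filter_append]
    simp [hHp, hv]
  · have hanyr : r.any (fun q => q.1 == p) = false := by
      cases h : r.any (fun q => q.1 == p) with
      | false => rfl
      | true => exact absurd h hc
    have hno : ∀ q ∈ r, (q.1 == p) = false := by
      intro q hq
      rcases List.any_eq_false.mp hanyr q hq with h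
      simpa using h
    have hany : ((r ++ [("H", h0)]).any (fun q => q.1 == p)) = false := by
      simp only [List.any_append, hanyr, Bool.false_or, List.any_cons, List.any_nil,
        Bool.or_false]
      exact hHp
    have hfp : r.find? (fun q => q.1 == p) = none := by
      rw [List.find?_eq_none]; intro q hq; simp [hno q hq]
    have hfilt : r.filter (fun q => !(q.1 == p)) = r :=
      List.filter_eq_self.mpr (fun q hq => by simp [hno q hq])
    simp [hany, hfilt, hfp]

-- A's whole hippocampus block equals B's pop/filter/append form, on an "H"-free
-- association list with nonnegative values
theorem pvHipp_eq (d : PySem.Dict String Int)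
    (hH : ∀ q ∈ d.items, q.1 ≠ "H") (hpos : ∀ q ∈ d.items, 0 ≤ q.2) :
    (let d1 := d.insert "H" (0 : Int)
     let d2 := (["AH", "MH", "PH"] : List String).foldl
      (fun counter_dict hipp_part =>
        if counter_dict.contains hipp_part then
          (counter_dict.insert "H" (counter_dict.getD "H" 0 + counter_dict.getD hipp_part 0)).erase hipp_part
        else counter_dict) d1
     if d2.getD "H" 0 == 0 then (d2.erase "H").items else d2.items)
    =
    (let h := (["AH", "MH", "PH"] : List String).foldl
      (fun acc part => acc + (((d.items.find? (fun q => q.1 == part)).map Prod.snd).getD 0)) 0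
     let r := d.items.filter (fun q => !(q.1 == "AH" || q.1 == "MH" || q.1 == "PH"))
     if h > 0 then r ++ [("H", h)] else r) := by
  obtain ⟨ℓ⟩ := d
  simp only [PySem.Dict.items] at hH hpos ⊢
  have hins : (PySem.Dict.mk ℓ).insert "H" (0 : Int) = PySem.Dict.mk (ℓ ++ [("H", 0)]) := by
    simp only [PySem.Dict.insert, PySem.Dict.contains, PySem.Dict.items]
    have : ℓ.any (fun q => q.1 == "H") = false := by
      rw [List.any_eq_false]; intro q hq; simpa using hH q hq
    simp [this]
  rw [hins]
  set r1 := ℓ.filter (fun q => !(q.1 == "AH")) with hr1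
  set r2 := r1.filter (fun q => !(q.1 == "MH")) with hr2
  set r3 := r2.filter (fun q => !(q.1 == "PH")) with hr3
  have hH1 : ∀ q ∈ r1, q.1 ≠ "H" := fun q hq => hH q (List.mem_of_mem_filter hq)
  have hH2 : ∀ q ∈ r2, q.1 ≠ "H" := fun q hq => hH1 q (List.mem_of_mem_filter hq)
  have hH3 : ∀ q ∈ r3, q.1 ≠ "H" := fun q hq => hH2 q (List.mem_of_mem_filter hq)
  have s1 := pvStepPart ℓ 0 "AH" (by decide) hH
  have s2 := pvStepPart r1 (0 + pvGetv ℓ "AH") "MH" (by decide) hH1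
  have s3 := pvStepPart r2 (0 + pvGetv ℓ "AH" + pvGetv r1 "MH") "PH" (by decide) hH2
  simp only [List.foldl_cons, List.foldl_nil]
  rw [s1, s2, s3]
  have g2 : pvGetv r1 "MH" = pvGetv ℓ "MH" := by
    unfold pvGetv; rw [hr1, pvFind_filter ℓ "MH" "AH" (by decide)]
  have g3 : pvGetv r2 "PH" = pvGetv ℓ "PH" := by
    unfold pvGetv
    rw [hr2, pvFind_filter r1 "PH" "MH" (by decide), hr1,
      pvFind_filter ℓ "PH" "AH" (by decide)]
  set S := 0 + pvGetv ℓ "AH" + pvGetv r1 "MH" + pvGetv r2 "PH" with hS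
  have hfindH3 : (r3 ++ [("H", S)]).find? (fun q => q.1 == "H") = some ("H", S) := by
    rw [List.find?_append]
    have : r3.find? (fun q => q.1 == "H") = none := by
      rw [List.find?_eq_none]; intro q hq; simpa using hH3 q hq
    rw [this]; simp
  have hget : (PySem.Dict.mk (r3 ++ [("H", S)])).getD "H" 0 = S := by
    simp only [PySem.Dict.getD, PySem.Dict.get?, hfindH3,
      Option.map_some, Option.getD_some]
  have herase : ((PySem.Dict.mk (r3 ++ [("H", S)])).erase "H").items = r3 := by
    simp only [PySem.Dict.erase]
    rw [List.filter_append, List.filter_eq_self.mpr (by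
      intro q hq; simpa using hH3 q hq)]
    simp
  have hr3' : r3 = ℓ.filter (fun q => !(q.1 == "AH" || q.1 == "MH" || q.1 == "PH")) := by
    rw [hr3, hr2, hr1, List.filter_filter, List.filter_filter]
    apply List.filter_congr
    intro q _
    cases h1 : (q.1 == "AH") <;> cases h2 : (q.1 == "MH") <;> cases h3 : (q.1 == "PH") <;> simp_all
  have hSnn : 0 ≤ S := by
    rw [hS, g2, g3]
    have p1 := pvGetv_nonneg ℓ "AH" hpos
    have p2 := pvGetv_nonneg ℓ "MH" hpos
    have p3 := pvGetv_nonneg ℓ "PH" hpos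
    omega
  simp only []
  rw [hget, ← hr3]
  have hB' : (0:Int) + (Option.map Prod.snd (List.find? (fun q => q.1 == "AH") ℓ)).getD 0
      + (Option.map Prod.snd (List.find? (fun q => q.1 == "MH") ℓ)).getD 0
      + (Option.map Prod.snd (List.find? (fun q => q.1 == "PH") ℓ)).getD 0 = S := by
    rw [hS, g2, g3]; rfl
  rw [hB']
  by_cases hz : S = 0
  · have hc1 : (S == 0) = true := by simpa using hz
    rw [if_pos hc1, if_neg (by omega : ¬ S > 0), herase, hr3']
  · have hc1 : (S == 0) = false := by simpa using hz
    rw [hc1]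
    simp only [Bool.false_eq_true, if_pos (by omega : S > 0)]
    rw [hr3']
    simp

-- ===== VERDICT (by name: the statement is the Claim_ definition above) =====
theorem count_channels_among_microwires_spec : Claim_equal_count_channels_among_microwires := by
  intro ms b _
  unfold Spec_count_channels_among_microwires
  unfold count_channels_among_microwires count_channels_among_microwires_alt
  simp only [pvCore_eq, pvKeys_eq]
  have hresult : (PySem.Set.ofList (ms.flatMap pvMatched)).map (fun k =>
        (k, ms.foldl (fun acc m => if pvHits k m then acc + 1 else acc) (0 : Int)))
      = (PySem.Dict.counter (ms.flatMap pvMatched)).items := by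
    rw [PySem.Dict.items_counter]
    apply List.map_congr_left
    intro k hk
    have hk' : k ∈ ms.flatMap pvMatched := (PySem.Set.mem_ofList _ _).mp hk
    obtain ⟨m, _, hm⟩ := List.mem_flatMap.mp hk'
    rw [← pvCount_eq ms k (pvMatched_mem m k hm)]
  have hH : ∀ q ∈ (PySem.Dict.counter (ms.flatMap pvMatched)).items, q.1 ≠ "H" := by
    intro q hq
    rw [PySem.Dict.items_counter] at hq
    obtain ⟨k, hk, rfl⟩ := List.mem_map.mp hq
    have hk' : k ∈ ms.flatMap pvMatched := (PySem.Set.mem_ofList _ _).mp hk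
    obtain ⟨m, _, hm⟩ := List.mem_flatMap.mp hk'
    have := pvMatched_mem m k hm
    simp only [pvOrder, List.mem_cons, List.not_mem_nil, or_false] at this
    rcases this with h|h|h|h|h|h <;> simp [h]
  have hpos : ∀ q ∈ (PySem.Dict.counter (ms.flatMap pvMatched)).items, 0 ≤ q.2 := by
    intro q hq
    rw [PySem.Dict.items_counter] at hq
    obtain ⟨k, hk, rfl⟩ := List.mem_map.mp hq
    positivity
  cases b
  · simpa using hresult.symm
  · have := pvHipp_eq (PySem.Dict.counter (ms.flatMap pvMatched)) hH hpos
    simp only at this ⊢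
    rw [hresult, this]
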